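-- pv_equiv track=rewrite | github.com/Flediko/Code_rectifier_parser | analyzer.py | refactor_code
-- ===== SOURCE A (Python) =====
-- def refactor_code(code):
--     """
--     Refactors C code:
--     1. Expands single-line multiple statements (e.g. 'int x; int y;' -> 2 lines).
--     2. Removes dead code (lines after return).
--     3. Fixes indentation (Auto-formatting).
--     """
--     # Pass 1: Expand multiple statements (Primitive approach)
--     # We want to split ';' but protect 'for' loops
--     lines = code.split('\n')
--     expanded_lines = []
--
--     for line in lines:
--         stripped = line.strip()
--         # If it's a for loop or doesn't have multiple statements, keep it
--         # Heuristic: if 'for' in line, don't touch it to avoid breaking loop headers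
--         if 'for' in stripped:
--             expanded_lines.append(stripped)
--             continue
--
--         # Split by semicolon, but keep the semicolon
--         if ';' in stripped:
--              # Basic split: replace ';' with ';\n' if followed by other stuff
--              # This handles 'int a; int b;' -> 'int a;\nint b;'
--              # We assume strings don't contain semicolons for this simple PBL
--              parts = stripped.split(';')
--              # Re-assemble with newlines, ignoring empty trailing parts
--              for i, part in enumerate(parts):
--                  if i < len(parts) - 1: # Add semicolon back to all but the last (which is empty or code)
--                      clean_part = part.strip()
--                      if clean_part:
--                          expanded_lines.append(clean_part + ';')
--                  else:
--                      clean_part = part.strip()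
--                      if clean_part:
--                          expanded_lines.append(clean_part)
--         else:
--             expanded_lines.append(stripped)
--
--     # Pass 2: Indentation and Dead Code
--     lines = expanded_lines # Use the expanded list
--     new_lines = []
--
--     has_returned = False
--     indent_level = 0
--
--     for line in lines:
--         stripped = line.strip()
--
--         # Dead Code Removal
--         if has_returned:
--             if stripped == '}':
--                 has_returned = False
--                 indent_level = max(0, indent_level - 1)
--                 new_lines.append("    " * indent_level + "}")
--             else:
--                 continue # Skip dead code
--         else:
--             # Check if this line ends the scope to decrease indent before adding
--             if stripped.startswith('}'):
--                  indent_level = max(0, indent_level - 1)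
--
--             # Add line with correct indentation
--             if stripped:
--                 new_lines.append("    " * indent_level + stripped)
--             else:
--                  new_lines.append("") # Keep empty lines
--
--             # Check if this line starts a scope to increase indent for next lines
--             if stripped.endswith('{'):
--                 indent_level += 1
--
--             if 'return' in stripped and not stripped.startswith('//'):
--                 has_returned = True
--
--     return '\n'.join(new_lines)
-- ===== SOURCE B (Python) =====
-- def refactor_code(code):
--     # Stage 1: flatten into a statement stream via a character scan (no split/enumerate).
--     stmts = []
--     for line in code.split('\n'):
--         s = line.strip()
--         if 'for' in s or ';' not in s:
--             stmts.append(s)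
--         else:
--             buf = ''
--             for ch in s:
--                 if ch == ';':
--                     t = buf.strip()
--                     if t:
--                         stmts.append(t + ';')
--                     buf = ''
--                 else:
--                     buf += ch
--             t = buf.strip()
--             if t:
--                 stmts.append(t)
--     # Stage 2: dead-code filter, tracking only the returned flag.
--     live = []
--     dead = False
--     for s in stmts:
--         if dead:
--             if s == '}':
--                 live.append(s)
--                 dead = False
--         else:
--             live.append(s)
--             dead = 'return' in s and not s.startswith('//')
--     # Stage 3: re-indentation, tracking only the indent level.
--     out = []
--     indent = 0
--     for s in live:
--         if s.startswith('}'):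
--             indent = max(0, indent - 1)
--         out.append('    ' * indent + s if s else '')
--         if s.endswith('{'):
--             indent += 1
--     return '\n'.join(out)
-- ===== Notes on version B (the rewrite author's own statement) =====
-- stated objective: alternative
-- what changed: Replaced A's two-pass design (split/enumerate statement expansion building an intermediate list, then one monolithic state machine mixing dead-code removal with indentation) by three single-purpose stages: a character-level scan that emits statements directly from each line, a dead-code filter that tracks only the returned flag, and a re-indentation pass that tracks only the indent level.
import Mathlib
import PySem

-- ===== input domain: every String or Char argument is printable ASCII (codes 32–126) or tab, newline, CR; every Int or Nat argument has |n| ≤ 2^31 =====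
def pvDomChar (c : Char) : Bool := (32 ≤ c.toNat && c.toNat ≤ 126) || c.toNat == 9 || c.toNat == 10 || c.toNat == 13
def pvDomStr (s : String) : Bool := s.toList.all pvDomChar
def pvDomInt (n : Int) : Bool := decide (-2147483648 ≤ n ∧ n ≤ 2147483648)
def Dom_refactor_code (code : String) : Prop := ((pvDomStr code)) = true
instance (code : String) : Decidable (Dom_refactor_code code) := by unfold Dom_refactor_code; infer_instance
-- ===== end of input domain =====

-- B replaces A's two passes (split-based expansion into an intermediate list, then one state
-- machine mixing dead-code removal with indentation) by three single-purpose stages: a character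
-- scan emitting statements, a dead-code filter (returned flag only), and a re-indent pass (indent
-- level only); objective: alternative decomposition, same cost.

-- ===== PORT A =====
-- literal transliteration of A (strings handled as List Char via PySem.Chars, joined back at the end)
def refactor_code (code : String) : String :=
  let lines := PySem.Chars.splitOn code.toList ['\n']
  let expanded := lines.foldl (fun acc line =>
    let stripped := PySem.Chars.strip line
    if PySem.Chars.isIn ['f','o','r'] stripped then acc ++ [stripped]
    else if PySem.Chars.isIn [';'] stripped then
      let parts := PySem.Chars.splitOn stripped [';']
      (PySem.List.enumerate parts).foldl (fun acc2 ip =>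
        if ip.1 < (parts.length : Int) - 1 then
          let c := PySem.Chars.strip ip.2
          if c ≠ [] then acc2 ++ [c ++ [';']] else acc2
        else
          let c := PySem.Chars.strip ip.2
          if c ≠ [] then acc2 ++ [c] else acc2) acc
    else acc ++ [stripped]) []
  let fin := expanded.foldl (fun st line =>
    let stripped := PySem.Chars.strip line
    if st.2.2 then
      if stripped = ['}'] then
        (st.1 ++ [List.replicate (4 * (st.2.1 - 1)) ' ' ++ ['}']], st.2.1 - 1, false)
      else st
    else
      let ind1 := if PySem.Chars.startswith stripped ['}'] then st.2.1 - 1 else st.2.1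
      let out1 := st.1 ++ [if stripped ≠ [] then List.replicate (4 * ind1) ' ' ++ stripped else []]
      let ind2 := if PySem.Chars.endswith stripped ['{'] then ind1 + 1 else ind1
      let ret2 := if PySem.Chars.isIn ['r','e','t','u','r','n'] stripped && !PySem.Chars.startswith stripped ['/','/'] then true else st.2.2
      (out1, ind2, ret2))
    (([] : List (List Char)), (0 : Nat), false)
  String.mk (PySem.Chars.join ['\n'] fin.1)

-- ===== PORT B =====
-- literal transliteration of Source B: three folds (char-scan statement stream, dead-code filter,
-- re-indent), each with its own minimal state
def refactor_code_alt (code : String) : String :=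
  let stmts := (PySem.Chars.splitOn code.toList ['\n']).foldl (fun stmts line =>
    let s := PySem.Chars.strip line
    if PySem.Chars.isIn ['f','o','r'] s || !PySem.Chars.isIn [';'] s then stmts ++ [s]
    else
      let fin := s.foldl (fun (st : List (List Char) × List Char) ch =>
        if ch = ';' then
          let t := PySem.Chars.strip st.2
          (if t ≠ [] then st.1 ++ [t ++ [';']] else st.1, [])
        else (st.1, st.2 ++ [ch])) (stmts, [])
      let t := PySem.Chars.strip fin.2
      if t ≠ [] then fin.1 ++ [t] else fin.1) []
  let live := stmts.foldl (fun (st : List (List Char) × Bool) s =>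
    if st.2 then
      if s = ['}'] then (st.1 ++ [s], false) else st
    else (st.1 ++ [s],
      PySem.Chars.isIn ['r','e','t','u','r','n'] s && !PySem.Chars.startswith s ['/','/'])) ([], false)
  let fin := live.1.foldl (fun (st : List (List Char) × Nat) s =>
    let ind := if PySem.Chars.startswith s ['}'] then st.2 - 1 else st.2
    (st.1 ++ [if s ≠ [] then List.replicate (4 * ind) ' ' ++ s else []],
     if PySem.Chars.endswith s ['{'] then ind + 1 else ind)) ([], 0)
  String.mk (PySem.Chars.join ['\n'] fin.1)

-- ===== PRECONDITION & SPEC =====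
def Spec_refactor_code (code : String) (out : String) : Prop := out = refactor_code_alt code
instance (code : String) (out : String) : Decidable (Spec_refactor_code code out) := by unfold Spec_refactor_code; infer_instance

-- ===== CLAIM (what is proved, stated in full; the proofs are below) =====
def Claim_equal_refactor_code : Prop := ∀ (code : String), Dom_refactor_code code → Spec_refactor_code code (refactor_code code)

-- ===== LEMMAS AND PROOFS =====

-- proof-side names for the five fold bodies (each is definitionally the lambda in its port)
def pvA1step (acc : List (List Char)) (line : List Char) : List (List Char) :=
  let stripped := PySem.Chars.strip line
  if PySem.Chars.isIn ['f','o','r'] stripped then acc ++ [stripped]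
  else if PySem.Chars.isIn [';'] stripped then
    let parts := PySem.Chars.splitOn stripped [';']
    (PySem.List.enumerate parts).foldl (fun acc2 ip =>
      if ip.1 < (parts.length : Int) - 1 then
        let c := PySem.Chars.strip ip.2
        if c ≠ [] then acc2 ++ [c ++ [';']] else acc2
      else
        let c := PySem.Chars.strip ip.2
        if c ≠ [] then acc2 ++ [c] else acc2) acc
  else acc ++ [stripped]

def pvA2step (st : List (List Char) × Nat × Bool) (line : List Char) : List (List Char) × Nat × Bool :=
  let stripped := PySem.Chars.strip line
  if st.2.2 then
    if stripped = ['}'] then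
      (st.1 ++ [List.replicate (4 * (st.2.1 - 1)) ' ' ++ ['}']], st.2.1 - 1, false)
    else st
  else
    let ind1 := if PySem.Chars.startswith stripped ['}'] then st.2.1 - 1 else st.2.1
    let out1 := st.1 ++ [if stripped ≠ [] then List.replicate (4 * ind1) ' ' ++ stripped else []]
    let ind2 := if PySem.Chars.endswith stripped ['{'] then ind1 + 1 else ind1
    let ret2 := if PySem.Chars.isIn ['r','e','t','u','r','n'] stripped && !PySem.Chars.startswith stripped ['/','/'] then true else st.2.2
    (out1, ind2, ret2)

def pvB1step (stmts : List (List Char)) (line : List Char) : List (List Char) :=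
  let s := PySem.Chars.strip line
  if PySem.Chars.isIn ['f','o','r'] s || !PySem.Chars.isIn [';'] s then stmts ++ [s]
  else
    let fin := s.foldl (fun (st : List (List Char) × List Char) ch =>
      if ch = ';' then
        let t := PySem.Chars.strip st.2
        (if t ≠ [] then st.1 ++ [t ++ [';']] else st.1, [])
      else (st.1, st.2 ++ [ch])) (stmts, [])
    let t := PySem.Chars.strip fin.2
    if t ≠ [] then fin.1 ++ [t] else fin.1

def pvB2step (st : List (List Char) × Bool) (s : List Char) : List (List Char) × Bool :=
  if st.2 then
    if s = ['}'] then (st.1 ++ [s], false) else st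
  else (st.1 ++ [s],
    PySem.Chars.isIn ['r','e','t','u','r','n'] s && !PySem.Chars.startswith s ['/','/'])

def pvB3step (st : List (List Char) × Nat) (s : List Char) : List (List Char) × Nat :=
  let ind := if PySem.Chars.startswith s ['}'] then st.2 - 1 else st.2
  (st.1 ++ [if s ≠ [] then List.replicate (4 * ind) ' ' ++ s else []],
   if PySem.Chars.endswith s ['{'] then ind + 1 else ind)

-- the common specification of pass 1's per-line emission
def pvEmitParts : List (List Char) → List (List Char)
  | [] => []
  | [p] => if PySem.Chars.strip p ≠ [] then [PySem.Chars.strip p] else []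
  | p :: q :: r =>
      (if PySem.Chars.strip p ≠ [] then [PySem.Chars.strip p ++ [';']] else []) ++ pvEmitParts (q :: r)

def pvExpandSpec (line : List Char) : List (List Char) :=
  let s := PySem.Chars.strip line
  if PySem.Chars.isIn ['f','o','r'] s || !PySem.Chars.isIn [';'] s then [s]
  else pvEmitParts (PySem.Chars.splitOn s [';'])

-- simple recursive characterisation of split(';')
def pvSplit : List Char → List (List Char)
  | [] => [[]]
  | c :: t => if c = ';' then [] :: pvSplit t else (pvSplit t).modifyHead (c :: ·)

-- dead-code filter as a recursive function
def pvRetOf (s : List Char) : Bool :=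
  PySem.Chars.isIn ['r','e','t','u','r','n'] s && !PySem.Chars.startswith s ['/','/']

def pvFilterDead : Bool → List (List Char) → List (List Char)
  | _, [] => []
  | true, s :: t => if s = ['}'] then s :: pvFilterDead false t else pvFilterDead true t
  | false, s :: t => s :: pvFilterDead (pvRetOf s) t

-- ---- strip lemmas ----
lemma pv_dropWhile_idem (p : Char → Bool) (l : List Char) :
    List.dropWhile p (List.dropWhile p l) = List.dropWhile p l := by
  cases h : List.dropWhile p l with
  | nil => rfl
  | cons a u =>
      have ha : p a = false := by
        have := List.head_dropWhile_not p (l := l) (by simp [h])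
        simpa [h] using this
      simp [ha]

lemma pv_lstrip_fix {a : Char} {u : List Char} (h : PySem.Chars.isspace a = false) :
    PySem.Chars.lstrip (a :: u) = a :: u := by
  simp [PySem.Chars.lstrip, h]

lemma pv_rstrip_fix_of_last {c : List Char} {w : Char} (hw : PySem.Chars.isspace w = false) :
    PySem.Chars.rstrip (c ++ [w]) = c ++ [w] := by
  simp [PySem.Chars.rstrip, hw]

lemma pv_rstrip_prefix (l : List Char) : PySem.Chars.rstrip l <+: l := by
  have h := List.dropWhile_suffix (l := l.reverse) PySem.Chars.isspace
  have h2 := List.reverse_prefix.mpr h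
  simpa [PySem.Chars.rstrip] using h2

lemma pv_rstrip_idem (l : List Char) :
    PySem.Chars.rstrip (PySem.Chars.rstrip l) = PySem.Chars.rstrip l := by
  simp [PySem.Chars.rstrip, pv_dropWhile_idem]

lemma pv_lstrip_rstrip (s : List Char) :
    PySem.Chars.lstrip (PySem.Chars.rstrip (PySem.Chars.lstrip s))
      = PySem.Chars.rstrip (PySem.Chars.lstrip s) := by
  cases hu : PySem.Chars.rstrip (PySem.Chars.lstrip s) with
  | nil => simp [PySem.Chars.lstrip]
  | cons a v =>
    have hpref : a :: v <+: PySem.Chars.lstrip s := hu ▸ pv_rstrip_prefix _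
    obtain ⟨r, hr⟩ := hpref
    have hd : List.dropWhile PySem.Chars.isspace s = a :: (v ++ r) := by
      simpa [PySem.Chars.lstrip] using hr.symm
    have hne : List.dropWhile PySem.Chars.isspace s ≠ [] := by simp [hd]
    have ha := List.head_dropWhile_not PySem.Chars.isspace (l := s) hne
    have ha' : PySem.Chars.isspace a = false := by simpa [hd] using ha
    exact pv_lstrip_fix ha'

lemma pv_strip_strip (s : List Char) :
    PySem.Chars.strip (PySem.Chars.strip s) = PySem.Chars.strip s := by
  unfold PySem.Chars.strip
  rw [pv_lstrip_rstrip, pv_rstrip_idem]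

lemma pv_lstrip_eq_of_strip_fix {c : List Char} (hfix : PySem.Chars.strip c = c) :
    PySem.Chars.lstrip c = c := by
  have h1 : PySem.Chars.lstrip c <:+ c := List.dropWhile_suffix _
  have h2 := (pv_rstrip_prefix (PySem.Chars.lstrip c)).length_le
  have h3 : (PySem.Chars.rstrip (PySem.Chars.lstrip c)).length = c.length := by
    rw [show PySem.Chars.rstrip (PySem.Chars.lstrip c) = c from hfix]
  exact h1.eq_of_length (Nat.le_antisymm h1.length_le (by omega))

lemma pv_head_not_space_of_fix {a : Char} {u : List Char}
    (hfix : PySem.Chars.strip (a :: u) = a :: u) : PySem.Chars.isspace a = false := by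
  have hl := pv_lstrip_eq_of_strip_fix hfix
  by_contra h
  have ha : PySem.Chars.isspace a = true := by simpa using h
  rw [PySem.Chars.lstrip, List.dropWhile_cons, if_pos ha] at hl
  have hle := (List.dropWhile_suffix (l := u) PySem.Chars.isspace).length_le
  have := congrArg List.length hl
  simp at this
  omega

lemma pv_strip_snoc {c : List Char} {w : Char} (hne : c ≠ []) (hfix : PySem.Chars.strip c = c)
    (hw : PySem.Chars.isspace w = false) :
    PySem.Chars.strip (c ++ [w]) = c ++ [w] := by
  cases c with
  | nil => exact absurd rfl hne
  | cons a u =>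
    have ha := pv_head_not_space_of_fix hfix
    unfold PySem.Chars.strip
    rw [show PySem.Chars.lstrip ((a :: u) ++ [w]) = (a :: u) ++ [w] from by
      simpa using pv_lstrip_fix (u := u ++ [w]) ha]
    exact pv_rstrip_fix_of_last hw

-- ---- pvSplit characterises PySem.Chars.splitOn · [';'] ----
lemma pv_split_ne_nil : ∀ (l : List Char), pvSplit l ≠ [] := by
  intro l
  induction l with
  | nil => simp [pvSplit]
  | cons c t ih =>
    by_cases h : c = ';' <;> simp [pvSplit, h]
    cases hh : pvSplit t with
    | nil => exact absurd hh ih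
    | cons p ps => simp

lemma pv_go_spec (fuel : Nat) : ∀ (l cur : List Char) (accl : List (List Char)),
    l.length ≤ fuel →
    PySem.Chars.splitOn.go [';'] fuel l cur accl
      = accl.reverse ++ (pvSplit l).modifyHead (cur.reverse ++ ·) := by
  induction fuel with
  | zero =>
    intro l cur accl h
    have : l = [] := by cases l with | nil => rfl | cons a b => simp at h
    subst this
    simp [PySem.Chars.splitOn.go, pvSplit]
  | succ f ih =>
    intro l cur accl h
    cases l with
    | nil => simp [PySem.Chars.splitOn.go, pvSplit]
    | cons c rest =>
      by_cases hc : c = ';'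
      · subst hc
        have hpre : [';'].isPrefixOf (';' :: rest) = true := by simp [List.isPrefixOf]
        rw [show PySem.Chars.splitOn.go [';'] (f+1) (';' :: rest) cur accl
            = PySem.Chars.splitOn.go [';'] f rest [] (cur.reverse :: accl) from by
          simp [PySem.Chars.splitOn.go, hpre]]
        rw [ih rest [] (cur.reverse :: accl) (by simp at h; omega)]
        cases hh : pvSplit rest with
        | nil => exact absurd hh (pv_split_ne_nil rest)
        | cons p ps => simp [pvSplit, hh]
      · have hpre : [';'].isPrefixOf (c :: rest) = false := by
          simp [List.isPrefixOf]; exact fun hh => hc hh.symm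
        rw [show PySem.Chars.splitOn.go [';'] (f+1) (c :: rest) cur accl
            = PySem.Chars.splitOn.go [';'] f rest (c :: cur) accl from by
          simp [PySem.Chars.splitOn.go, hpre]]
        rw [ih rest (c :: cur) accl (by simp at h; omega)]
        cases hh : pvSplit rest with
        | nil => exact absurd hh (pv_split_ne_nil rest)
        | cons p ps => simp [pvSplit, hc, hh]

lemma pv_splitOn_semi (s : List Char) : PySem.Chars.splitOn s [';'] = pvSplit s := by
  unfold PySem.Chars.splitOn
  rw [pv_go_spec (s.length + 1) s [] [] (by omega)]
  cases hh : pvSplit s with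
  | nil => exact absurd hh (pv_split_ne_nil s)
  | cons p ps => simp

-- ---- every statement pass 1 emits is strip-fixed ----
lemma pv_emit_fixed : ∀ (parts : List (List Char)) {x : List Char},
    x ∈ pvEmitParts parts → PySem.Chars.strip x = x := by
  intro parts
  induction parts with
  | nil => intro x hx; simp [pvEmitParts] at hx
  | cons p rest ih =>
    intro x hx
    cases rest with
    | nil =>
      by_cases hp : PySem.Chars.strip p ≠ [] <;> simp [pvEmitParts, hp] at hx
      subst hx; exact pv_strip_strip p
    | cons q r =>
      rw [show pvEmitParts (p :: q :: r)
          = (if PySem.Chars.strip p ≠ [] then [PySem.Chars.strip p ++ [';']] else [])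
            ++ pvEmitParts (q :: r) from rfl] at hx
      rcases List.mem_append.mp hx with h | h
      · by_cases hp : PySem.Chars.strip p ≠ [] <;> simp [hp] at h
        subst h
        exact pv_strip_snoc (by simpa using hp) (pv_strip_strip p) (by decide)
      · exact ih h

lemma pv_expand_fixed {line x : List Char} (hx : x ∈ pvExpandSpec line) :
    PySem.Chars.strip x = x := by
  unfold pvExpandSpec at hx
  by_cases hc : (PySem.Chars.isIn ['f','o','r'] (PySem.Chars.strip line)
      || !PySem.Chars.isIn [';'] (PySem.Chars.strip line)) = true
  · rw [if_pos hc] at hx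
    simp at hx; subst hx; exact pv_strip_strip line
  · rw [if_neg hc] at hx
    exact pv_emit_fixed _ hx

-- ---- A's enumerate fold emits pvEmitParts ----
lemma pv_enum_core (n : Nat) (parts : List (List Char)) (k : Int)
    (hk : k + parts.length = (n : Int)) :
    (PySem.List.enumerate parts k).flatMap (fun ip =>
        if ip.1 < (n : Int) - 1 then
          (if PySem.Chars.strip ip.2 ≠ [] then [PySem.Chars.strip ip.2 ++ [';']] else [])
        else
          (if PySem.Chars.strip ip.2 ≠ [] then [PySem.Chars.strip ip.2] else []))
    = pvEmitParts parts := by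
  induction parts generalizing k with
  | nil => simp [PySem.List.enumerate, pvEmitParts]
  | cons p rest ih =>
    cases rest with
    | nil =>
      have hcond : ¬ (k < (n : Int) - 1) := by simp at hk; omega
      simp [PySem.List.enumerate, hcond, pvEmitParts]
    | cons q rest' =>
      have hcond : k < (n : Int) - 1 := by simp at hk; omega
      rw [PySem.List.enumerate_cons]
      simp only [List.flatMap_cons]
      rw [ih (k + 1) (by simp at hk ⊢; omega)]
      rw [show pvEmitParts (p :: q :: rest')
          = (if PySem.Chars.strip p ≠ [] then [PySem.Chars.strip p ++ [';']] else [])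
            ++ pvEmitParts (q :: rest') from rfl]
      simp [if_pos hcond]

lemma pv_bodyA_eq (acc : List (List Char)) (line : List Char) :
    pvA1step acc line = acc ++ pvExpandSpec line := by
  unfold pvA1step pvExpandSpec
  by_cases hfor : PySem.Chars.isIn ['f','o','r'] (PySem.Chars.strip line) = true
  · simp [hfor]
  · by_cases hsemi : PySem.Chars.isIn [';'] (PySem.Chars.strip line) = true
    · have hb : (PySem.Chars.isIn ['f','o','r'] (PySem.Chars.strip line)
          || !PySem.Chars.isIn [';'] (PySem.Chars.strip line)) = false := by
        simp [Bool.not_eq_true] at hfor ⊢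
        exact ⟨hfor, hsemi⟩
      rw [if_neg (by simp [hfor]), if_pos hsemi]
      rw [PySem.List.foldl_congr_mem _ _
        (fun acc2 ip =>
          acc2 ++ (if ip.1 < ((PySem.Chars.splitOn (PySem.Chars.strip line) [';']).length : Int) - 1 then
            (if PySem.Chars.strip ip.2 ≠ [] then [PySem.Chars.strip ip.2 ++ [';']] else [])
          else
            (if PySem.Chars.strip ip.2 ≠ [] then [PySem.Chars.strip ip.2] else []))) acc
        (by intro acc2 ip _; dsimp only; split_ifs <;> simp)]
      rw [PySem.List.foldl_append_eq_flatMap]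
      rw [pv_enum_core (PySem.Chars.splitOn (PySem.Chars.strip line) [';']).length _ 0 (by simp)]
      simp [hb]
    · simp [hfor, hsemi]

-- ---- B's char scan emits pvEmitParts ----
lemma pv_scan_spec (s : List Char) : ∀ (acc : List (List Char)) (buf : List Char),
    (let fin := s.foldl (fun (st : List (List Char) × List Char) ch =>
        if ch = ';' then
          (if PySem.Chars.strip st.2 ≠ [] then st.1 ++ [PySem.Chars.strip st.2 ++ [';']] else st.1, [])
        else (st.1, st.2 ++ [ch])) (acc, buf)
     if PySem.Chars.strip fin.2 ≠ [] then fin.1 ++ [PySem.Chars.strip fin.2] else fin.1)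
    = acc ++ pvEmitParts ((pvSplit s).modifyHead (buf ++ ·)) := by
  induction s with
  | nil =>
    intro acc buf
    by_cases hb : PySem.Chars.strip buf ≠ [] <;> simp [pvSplit, pvEmitParts, hb]
  | cons c t ih =>
    intro acc buf
    by_cases hc : c = ';'
    · subst hc
      simp only [List.foldl_cons, reduceIte]
      rw [ih (if PySem.Chars.strip buf ≠ [] then acc ++ [PySem.Chars.strip buf ++ [';']] else acc) []]
      cases hh : pvSplit t with
      | nil => exact absurd hh (pv_split_ne_nil t)
      | cons p ps =>
        rw [show pvSplit (';' :: t) = [] :: pvSplit t from by simp [pvSplit]]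
        rw [hh]
        rw [show ([] :: p :: ps).modifyHead (buf ++ ·) = buf :: p :: ps from by simp]
        rw [show pvEmitParts (buf :: p :: ps)
            = (if PySem.Chars.strip buf ≠ [] then [PySem.Chars.strip buf ++ [';']] else [])
              ++ pvEmitParts (p :: ps) from rfl]
        by_cases hb : PySem.Chars.strip buf ≠ [] <;> simp [hb]
    · simp only [List.foldl_cons, if_neg hc]
      rw [ih acc (buf ++ [c])]
      rw [show pvSplit (c :: t) = (pvSplit t).modifyHead (c :: ·) from by simp [pvSplit, hc]]
      cases hh : pvSplit t with
      | nil => exact absurd hh (pv_split_ne_nil t)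
      | cons p ps => simp [hh]

lemma pv_bodyB_eq (stmts : List (List Char)) (line : List Char) :
    pvB1step stmts line = stmts ++ pvExpandSpec line := by
  unfold pvB1step pvExpandSpec
  by_cases hc : (PySem.Chars.isIn ['f','o','r'] (PySem.Chars.strip line)
      || !PySem.Chars.isIn [';'] (PySem.Chars.strip line)) = true
  · simp [hc]
  · rw [if_neg hc, if_neg hc]
    have h := pv_scan_spec (PySem.Chars.strip line) stmts []
    simp only [] at h
    rw [show ((pvSplit (PySem.Chars.strip line)).modifyHead (([] : List Char) ++ ·))
        = pvSplit (PySem.Chars.strip line) from by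
      cases hh : pvSplit (PySem.Chars.strip line) with
      | nil => rfl
      | cons p ps => simp] at h
    rw [pv_splitOn_semi]
    exact h

-- ---- pass 1 of both ports = flatMap pvExpandSpec ----
lemma pv_pass1A (L : List (List Char)) : L.foldl pvA1step [] = L.flatMap pvExpandSpec := by
  rw [PySem.List.foldl_congr_mem _ _ (fun acc l => acc ++ pvExpandSpec l) []
    (fun acc x _ => pv_bodyA_eq acc x)]
  rw [PySem.List.foldl_append_eq_flatMap, List.nil_append]

lemma pv_pass1B (L : List (List Char)) : L.foldl pvB1step [] = L.flatMap pvExpandSpec := by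
  rw [PySem.List.foldl_congr_mem _ _ (fun acc l => acc ++ pvExpandSpec l) []
    (fun acc x _ => pv_bodyB_eq acc x)]
  rw [PySem.List.foldl_append_eq_flatMap, List.nil_append]

-- ---- B's dead-code fold computes pvFilterDead ----
lemma pv_stage2_spec : ∀ (stmts live : List (List Char)) (dead : Bool),
    (stmts.foldl pvB2step (live, dead)).1 = live ++ pvFilterDead dead stmts := by
  intro stmts
  induction stmts with
  | nil => intro live dead; cases dead <;> simp [pvFilterDead]
  | cons s t ih =>
    intro live dead
    cases dead with
    | false =>
      simp only [List.foldl_cons]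
      rw [show pvB2step (live, false) s = (live ++ [s], pvRetOf s) from rfl]
      rw [ih, show pvFilterDead false (s :: t) = s :: pvFilterDead (pvRetOf s) t from rfl]
      simp
    | true =>
      by_cases hb : s = ['}']
      · subst hb
        simp only [List.foldl_cons]
        rw [show pvB2step (live, true) ['}'] = (live ++ [['}']], false) from by
          simp [pvB2step]]
        rw [ih, show pvFilterDead true (['}'] :: t) = ['}'] :: pvFilterDead false t from by
          simp [pvFilterDead]]
        simp
      · simp only [List.foldl_cons]
        rw [show pvB2step (live, true) s = (live, true) from by simp [pvB2step, hb]]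
        rw [ih, show pvFilterDead true (s :: t) = pvFilterDead true t from by
          simp [pvFilterDead, hb]]

-- ---- A's pass 2 = re-indent of the dead-code-filtered stream ----
lemma pv_pass2_eq : ∀ (stmts : List (List Char)), (∀ x ∈ stmts, PySem.Chars.strip x = x) →
    ∀ (out : List (List Char)) (ind : Nat) (ret : Bool),
    (stmts.foldl pvA2step (out, ind, ret)).1
      = ((pvFilterDead ret stmts).foldl pvB3step (out, ind)).1 := by
  intro stmts
  induction stmts with
  | nil => intro _ out ind ret; cases ret <;> simp [pvFilterDead]
  | cons s t ih =>
    intro hfix out ind ret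
    have hs : PySem.Chars.strip s = s := hfix s (by simp)
    have hfix' : ∀ x ∈ t, PySem.Chars.strip x = x := fun x hx => hfix x (by simp [hx])
    cases ret with
    | true =>
      by_cases hb : s = ['}']
      · subst hb
        simp only [List.foldl_cons]
        rw [show pvA2step (out, ind, true) ['}']
            = (out ++ [List.replicate (4 * (ind - 1)) ' ' ++ ['}']], ind - 1, false) from by
          simp [pvA2step, hs]]
        rw [show pvFilterDead true (['}'] :: t) = ['}'] :: pvFilterDead false t from by
          simp [pvFilterDead], List.foldl_cons,
          show pvB3step (out, ind) ['}']
            = (out ++ [List.replicate (4 * (ind - 1)) ' ' ++ ['}']], ind - 1) from by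
          simp [pvB3step, show PySem.Chars.startswith ['}'] ['}'] = true from by decide,
            show PySem.Chars.endswith ['}'] ['{'] = false from by decide]]
        exact ih hfix' _ _ false
      · simp only [List.foldl_cons]
        rw [show pvA2step (out, ind, true) s = (out, ind, true) from by
          simp [pvA2step, hs, hb]]
        rw [show pvFilterDead true (s :: t) = pvFilterDead true t from by
          simp [pvFilterDead, hb]]
        exact ih hfix' _ _ true
    | false =>
      simp only [List.foldl_cons]
      rw [show pvFilterDead false (s :: t) = s :: pvFilterDead (pvRetOf s) t from rfl,
        List.foldl_cons]
      rw [show pvA2step (out, ind, false)  s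
          = (out ++ [if s ≠ [] then
              List.replicate (4 * (if PySem.Chars.startswith s ['}'] then ind - 1 else ind)) ' ' ++ s else []],
             (if PySem.Chars.endswith s ['{'] then
                (if PySem.Chars.startswith s ['}'] then ind - 1 else ind) + 1
              else (if PySem.Chars.startswith s ['}'] then ind - 1 else ind)),
             pvRetOf s) from by
        simp only [pvA2step, hs, pvRetOf]
        cases hr : PySem.Chars.isIn ['r','e','t','u','r','n'] s && !PySem.Chars.startswith s ['/','/'] <;> simp]
      rw [show pvB3step (out, ind) s
          = (out ++ [if s ≠ [] then
              List.replicate (4 * (if PySem.Chars.startswith s ['}'] then ind - 1 else ind)) ' ' ++ s else []],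
             (if PySem.Chars.endswith s ['{'] then
                (if PySem.Chars.startswith s ['}'] then ind - 1 else ind) + 1
              else (if PySem.Chars.startswith s ['}'] then ind - 1 else ind))) from rfl]
      exact ih hfix' _ _ (pvRetOf s)

-- ---- the whole pipelines agree ----
lemma pv_final (L : List (List Char)) :
    ((L.foldl pvA1step []).foldl pvA2step ([], 0, false)).1
      = (((L.foldl pvB1step []).foldl pvB2step ([], false)).1.foldl pvB3step ([], 0)).1 := by
  rw [pv_pass1A, pv_pass1B, pv_stage2_spec, List.nil_append]
  exact pv_pass2_eq _ (fun x hx => by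
    obtain ⟨line, -, hxl⟩ := List.mem_flatMap.mp hx
    exact pv_expand_fixed hxl) [] 0 false

-- ===== VERDICT (by name: the statement is the Claim_ definition above) =====
theorem refactor_code_spec : Claim_equal_refactor_code := by
  intro code _
  unfold Spec_refactor_code refactor_code refactor_code_alt
  exact congrArg (fun t => String.mk (PySem.Chars.join ['\n'] t))
    (pv_final (PySem.Chars.splitOn code.toList ['\n']))
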